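-- pv_equiv track=rewrite | github.com/p-doom/inverse-dynamics-model | evaluate/generate.py | _window_coverage_counts
-- ===== SOURCE A (Python) =====
-- def _window_coverage_counts(
--     n_actions: int, windows: list[tuple[int, int, int, int]]
-- ) -> tuple[list[int], list[int]]:
--     in_any_count = [0] * n_actions
--     in_used_count = [0] * n_actions
--     for start, end, use_start, use_end in windows:
--         for idx in range(max(start, 0), min(end, n_actions)):
--             in_any_count[idx] += 1
--         use_global_start = start + use_start
--         use_global_end = start + use_end
--         for idx in range(max(use_global_start, 0), min(use_global_end, n_actions)):
--             in_used_count[idx] += 1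
--     return in_any_count, in_used_count
-- ===== SOURCE B (Python) =====
-- def _add(diff, a, b, n):
--     lo = min(max(a, 0), n)
--     hi = min(max(b, 0), n)
--     if lo < hi:
--         diff[lo] += 1
--         diff[hi] -= 1
--
--
-- def _prefix(diff, n):
--     out = []
--     run = 0
--     for i in range(n):
--         run += diff[i]
--         out.append(run)
--     return out
--
--
-- def _window_coverage_counts(
--     n_actions: int, windows: list[tuple[int, int, int, int]]
-- ) -> tuple[list[int], list[int]]:
--     n = max(n_actions, 0)
--     diff_any = [0] * (n + 1)
--     diff_used = [0] * (n + 1)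
--     for start, end, use_start, use_end in windows:
--         _add(diff_any, start, end, n)
--         _add(diff_used, start + use_start, start + use_end, n)
--     return _prefix(diff_any, n), _prefix(diff_used, n)
-- ===== Notes on version B (the rewrite author's own statement) =====
-- stated objective: alternative
-- what changed: Replaces the per-window inner loops that increment every covered index with a difference array (+1/-1 at clamped endpoints per window) followed by one prefix-sum pass per output list.
import Mathlib
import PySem

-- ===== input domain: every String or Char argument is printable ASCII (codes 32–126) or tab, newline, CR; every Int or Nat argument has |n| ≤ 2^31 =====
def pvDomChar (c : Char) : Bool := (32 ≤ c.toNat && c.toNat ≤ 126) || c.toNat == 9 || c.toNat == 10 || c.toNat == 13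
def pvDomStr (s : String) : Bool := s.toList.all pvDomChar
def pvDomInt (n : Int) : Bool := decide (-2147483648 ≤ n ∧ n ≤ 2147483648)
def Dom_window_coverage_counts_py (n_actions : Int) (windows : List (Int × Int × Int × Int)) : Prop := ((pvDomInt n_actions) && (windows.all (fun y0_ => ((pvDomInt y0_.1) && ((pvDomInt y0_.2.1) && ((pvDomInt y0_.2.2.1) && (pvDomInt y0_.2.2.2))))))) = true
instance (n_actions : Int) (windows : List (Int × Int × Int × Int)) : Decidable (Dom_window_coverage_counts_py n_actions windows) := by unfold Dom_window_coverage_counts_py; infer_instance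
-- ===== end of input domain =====

-- B replaces A's per-window inner increment loops with a difference array (+1/-1 at
-- clamped endpoints per window) and a single prefix-sum pass per output list.


-- ===== PORT A =====
-- `[0] * n_actions` is `List.replicate n_actions.toNat 0` (a non-positive multiplicity
-- gives the empty list, exactly as Python). `xs[idx] += 1` is pySetD/pyGetD at idx.
def window_coverage_counts_py (n_actions : Int) (windows : List (Int × Int × Int × Int)) : List Int × List Int :=
  let in_any_count : List Int := List.replicate n_actions.toNat 0
  let in_used_count : List Int := List.replicate n_actions.toNat 0
  windows.foldl
    (fun (st : List Int × List Int) w =>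
      match w with
      | (start, «end», use_start, use_end) =>
        let any' := (PySem.List.pyRange (max start 0) (min «end» n_actions) 1).foldl
          (fun l idx => PySem.List.pySetD l idx (PySem.List.pyGetD l idx 0 + 1)) st.1
        let use_global_start := start + use_start
        let use_global_end := start + use_end
        let used' := (PySem.List.pyRange (max use_global_start 0) (min use_global_end n_actions) 1).foldl
          (fun l idx => PySem.List.pySetD l idx (PySem.List.pyGetD l idx 0 + 1)) st.2
        (any', used'))
    (in_any_count, in_used_count)

-- ===== PORT B =====
def pvAddRange (diff : List Int) (a b n : Int) : List Int :=
  let lo := min (max a 0) n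
  let hi := min (max b 0) n
  if lo < hi then
    let d1 := PySem.List.pySetD diff lo (PySem.List.pyGetD diff lo 0 + 1)
    PySem.List.pySetD d1 hi (PySem.List.pyGetD d1 hi 0 - 1)
  else diff

def pvPrefix (diff : List Int) (n : Int) : List Int :=
  ((PySem.List.pyRange 0 n 1).foldl
    (fun (st : List Int × Int) i =>
      let run := st.2 + PySem.List.pyGetD diff i 0
      (st.1 ++ [run], run)) ([], 0)).1

def window_coverage_counts_py_alt (n_actions : Int) (windows : List (Int × Int × Int × Int)) : List Int × List Int :=
  let n := max n_actions 0
  let diffs := windows.foldl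
    (fun (st : List Int × List Int) w =>
      match w with
      | (start, «end», use_start, use_end) =>
        (pvAddRange st.1 start «end» n,
         pvAddRange st.2 (start + use_start) (start + use_end) n))
    (List.replicate (n.toNat + 1) 0, List.replicate (n.toNat + 1) 0)
  (pvPrefix diffs.1 n, pvPrefix diffs.2 n)

-- ===== PRECONDITION & SPEC =====
def Spec_window_coverage_counts_py (n_actions : Int) (windows : List (Int × Int × Int × Int)) (out : List Int × List Int) : Prop := out = window_coverage_counts_py_alt n_actions windows
instance (n_actions : Int) (windows : List (Int × Int × Int × Int)) (out : List Int × List Int) : Decidable (Spec_window_coverage_counts_py n_actions windows out) := by unfold Spec_window_coverage_counts_py; infer_instance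

-- ===== CLAIM (what is proved, stated in full; the proofs are below) =====
def Claim_equal_window_coverage_counts_py : Prop := ∀ (n_actions : Int) (windows : List (Int × Int × Int × Int)), Dom_window_coverage_counts_py n_actions windows → Spec_window_coverage_counts_py n_actions windows (window_coverage_counts_py n_actions windows)


-- ===== LEMMAS AND PROOFS =====

theorem pv_take_succ_sum (d : List Int) : ∀ (m : Nat),
    (d.take (m + 1)).sum = (d.take m).sum + d.getD m 0 := by
  induction d with
  | nil => intro m; simp [List.getD]
  | cons x t ih =>
    intro m
    cases m with
    | zero => simp [List.getD]
    | succ m =>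
      simp only [List.take_succ_cons, List.sum_cons, ih m, List.getD]
      rw [List.getElem?_cons_succ]
      ring

theorem pv_set_take_sum (d : List Int) : ∀ (k : Nat) (v : Int) (m : Nat), k < d.length →
    ((d.set k v).take m).sum = (d.take m).sum + (if k < m then v - d.getD k 0 else 0) := by
  induction d with
  | nil => intro k v m hk; simp at hk
  | cons x t ih =>
    intro k v m hk
    cases k with
    | zero =>
      cases m with
      | zero => simp
      | succ m => simp [List.getD]; ring
    | succ k =>
      cases m with
      | zero => simp
      | succ m =>
        simp only [List.set_cons_succ, List.take_succ_cons, List.sum_cons,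
          ih k v m (by simpa using hk), List.getD]
        rw [List.getElem?_cons_succ]
        split_ifs with h1 h2 h2
        · ring
        · exfalso; omega
        · exfalso; omega
        · ring

theorem pv_two_set_take_sum (d : List Int) (p q : Nat) (hp : p < d.length) (hq : q < d.length)
    (m : Nat) :
    (((d.set p (d.getD p 0 + 1)).set q ((d.set p (d.getD p 0 + 1)).getD q 0 - 1)).take m).sum
      = (d.take m).sum + ((if p < m then 1 else 0) - (if q < m then 1 else 0)) := by
  rw [pv_set_take_sum _ q _ m (by simpa using hq), pv_set_take_sum _ p _ m hp]
  split_ifs <;> ring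

theorem pv_bump_length (r : List Int) : ∀ (xs : List Int),
    (r.foldl (fun l idx => PySem.List.pySetD l idx (PySem.List.pyGetD l idx 0 + 1)) xs).length
      = xs.length := by
  induction r with
  | nil => intro xs; rfl
  | cons x t ih =>
    intro xs
    simp only [List.foldl_cons, ih, PySem.List.length_pySetD]


theorem pv_bump_getD (k : Nat) : ∀ (a b : Int) (xs : List Int) (i : Nat),
    (b - a).toNat = k → 0 ≤ a → b ≤ (xs.length : Int) →
    ((PySem.List.pyRange a b 1).foldl
        (fun l idx => PySem.List.pySetD l idx (PySem.List.pyGetD l idx 0 + 1)) xs).getD i 0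
      = xs.getD i 0 + (if a ≤ (i : Int) ∧ (i : Int) < b then 1 else 0) := by
  induction k with
  | zero =>
    intro a b xs i hk ha hb
    rw [PySem.List.pyRange_one_eq_nil (by omega)]
    simp only [List.foldl_nil]
    have h : ¬ (a ≤ (i : Int) ∧ (i : Int) < b) := by omega
    simp [h]
  | succ k ih =>
    intro a b xs i hk ha hb
    have hab : a < b := by omega
    rw [PySem.List.pyRange_one_cons hab]
    simp only [List.foldl_cons]
    have halen : a.toNat < xs.length := by omega
    rw [PySem.List.pySetD_of_nonneg _ _ ha,
      ih (a + 1) b _ i (by omega) (by omega) (by simp; omega)]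
    have hget : ((xs.set a.toNat (PySem.List.pyGetD xs a 0 + 1)).getD i 0)
        = xs.getD i 0 + (if (i : Int) = a then 1 else 0) := by
      by_cases hia : i = a.toNat
      · subst hia
        rw [if_pos (by omega)]
        rw [List.getD_eq_getElem _ 0 (by simpa using halen),
          List.getD_eq_getElem _ 0 halen, List.getElem_set_self (by simpa using halen),
          PySem.List.pyGetD_eq_getElem xs 0 ha (by omega)]
      · rw [if_neg (by omega)]
        simp [List.getD, (show ¬ a.toNat = i by omega)]
    rw [hget]
    split_ifs <;> first | (exfalso; omega) | omega


theorem pv_addRange_take_sum (d : List Int) (a b : Int) (N : Nat)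
    (hd : d.length = N + 1) (i : Nat) (hi : i < N) :
    ((pvAddRange d a b (N : Int)).take (i + 1)).sum
      = (d.take (i + 1)).sum
        + (if max a 0 ≤ (i : Int) ∧ (i : Int) < min b (N : Int) then 1 else 0) := by
  simp only [pvAddRange]
  by_cases h : min (max a 0) (N : Int) < min (max b 0) (N : Int)
  · rw [if_pos h]
    have hlo0 : (0:Int) ≤ min (max a 0) (N : Int) := by omega
    have hhi0 : (0:Int) ≤ min (max b 0) (N : Int) := by omega
    have hlolen : (min (max a 0) (N : Int)).toNat < d.length := by omega
    have hhilen : (min (max b 0) (N : Int)).toNat < d.length := by omega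
    rw [PySem.List.pySetD_of_nonneg _ _ hlo0]
    rw [PySem.List.pySetD_of_nonneg _ _ hhi0]
    rw [PySem.List.pyGetD_eq_getElem d 0 hlo0 (by omega),
      ← List.getD_eq_getElem d 0 hlolen]
    rw [PySem.List.pyGetD_eq_getElem _ 0 hhi0 (by simp; omega),
      ← List.getD_eq_getElem _ 0 (by simp; omega : (min (max b 0) (N : Int)).toNat
          < (d.set (min (max a 0) (N : Int)).toNat (d.getD (min (max a 0) (N : Int)).toNat 0 + 1)).length)]
    rw [pv_two_set_take_sum d _ _ hlolen hhilen]
    have hind : (if max a 0 ≤ (i : Int) ∧ (i : Int) < min b (N : Int) then (1:Int) else 0)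
        = ((if (min (max a 0) (N : Int)).toNat < i + 1 then (1:Int) else 0)
           - (if (min (max b 0) (N : Int)).toNat < i + 1 then (1:Int) else 0)) := by
      split_ifs <;> first | (exfalso; omega) | omega
    rw [hind]
  · rw [if_neg h]
    have hneg : ¬ (max a 0 ≤ (i : Int) ∧ (i : Int) < min b (N : Int)) := by omega
    rw [if_neg hneg, add_zero]

theorem pv_prefix_aux (d : List Int) : ∀ (N : Nat),
    ((PySem.List.pyRange 0 (N : Int) 1).foldl
        (fun (st : List Int × Int) i =>
          (st.1 ++ [st.2 + PySem.List.pyGetD d i 0], st.2 + PySem.List.pyGetD d i 0)) ([], 0))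
      = ((List.range N).map (fun i => (d.take (i + 1)).sum), (d.take N).sum) := by
  intro N
  induction N with
  | zero => simp [PySem.List.pyRange_one_eq_nil]
  | succ N ih =>
    have hcast : ((N + 1 : Nat) : Int) = (N : Int) + 1 := by push_cast; ring
    rw [hcast, PySem.List.pyRange_one_succ_right (by omega), List.foldl_append, ih]
    simp only [List.foldl_cons, List.foldl_nil, PySem.List.pyGetD_natCast,
      List.range_succ, List.map_append, List.map_cons, List.map_nil]
    rw [← pv_take_succ_sum d N]

theorem pv_prefix_eq (d : List Int) (N : Nat) :
    pvPrefix d (N : Int) = (List.range N).map (fun i => (d.take (i + 1)).sum) := by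
  unfold pvPrefix
  rw [show (fun (st : List Int × Int) i =>
        let run := st.2 + PySem.List.pyGetD d i 0
        (st.1 ++ [run], run))
      = (fun (st : List Int × Int) i =>
        (st.1 ++ [st.2 + PySem.List.pyGetD d i 0], st.2 + PySem.List.pyGetD d i 0)) from rfl,
    pv_prefix_aux d N]

theorem pv_addRange_length (diff : List Int) (a b n : Int) :
    (pvAddRange diff a b n).length = diff.length := by
  simp only [pvAddRange]
  split <;> simp

theorem pv_fold_inv (n_actions : Int) (ws : List (Int × Int × Int × Int)) :
    ∀ (xa xu da du : List Int),
    xa.length = n_actions.toNat → xu.length = n_actions.toNat →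
    da.length = n_actions.toNat + 1 → du.length = n_actions.toNat + 1 →
    (∀ i : Nat, i < n_actions.toNat →
        xa.getD i 0 = (da.take (i + 1)).sum ∧ xu.getD i 0 = (du.take (i + 1)).sum) →
    (let A := ws.foldl
        (fun (st : List Int × List Int) w =>
          match w with
          | (start, «end», use_start, use_end) =>
            let any' := (PySem.List.pyRange (max start 0) (min «end» n_actions) 1).foldl
              (fun l idx => PySem.List.pySetD l idx (PySem.List.pyGetD l idx 0 + 1)) st.1
            let use_global_start := start + use_start
            let use_global_end := start + use_end
            let used' := (PySem.List.pyRange (max use_global_start 0) (min use_global_end n_actions) 1).foldl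
              (fun l idx => PySem.List.pySetD l idx (PySem.List.pyGetD l idx 0 + 1)) st.2
            (any', used'))
        (xa, xu)
     let B := ws.foldl
        (fun (st : List Int × List Int) w =>
          match w with
          | (start, «end», use_start, use_end) =>
            (pvAddRange st.1 start «end» (max n_actions 0),
             pvAddRange st.2 (start + use_start) (start + use_end) (max n_actions 0)))
        (da, du)
     A.1.length = n_actions.toNat ∧ A.2.length = n_actions.toNat ∧
     ∀ i : Nat, i < n_actions.toNat →
        A.1.getD i 0 = (B.1.take (i + 1)).sum ∧ A.2.getD i 0 = (B.2.take (i + 1)).sum) := by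
  induction ws with
  | nil =>
    intro xa xu da du h1 h2 h3 h4 h5
    exact ⟨h1, h2, h5⟩
  | cons w t ih =>
    intro xa xu da du h1 h2 h3 h4 h5
    obtain ⟨start, «end», use_start, use_end⟩ := w
    simp only [List.foldl_cons]
    have hNcast : ((n_actions.toNat : Int)) = max n_actions 0 := by omega
    refine ih _ _ _ _ ?_ ?_ ?_ ?_ ?_
    · rw [pv_bump_length]; exact h1
    · rw [pv_bump_length]; exact h2
    · rw [pv_addRange_length]; exact h3
    · rw [pv_addRange_length]; exact h4
    · intro i hi
      have hiN : (i : Int) < (n_actions.toNat : Int) := by omega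
      constructor
      · rw [pv_bump_getD ((min «end» n_actions - max start 0).toNat) _ _ _ _ rfl
          (by omega) (by rw [h1]; omega)]
        rw [← hNcast, pv_addRange_take_sum da start «end» n_actions.toNat h3 i hi,
          ← (h5 i hi).1]
        have hiff : (max start 0 ≤ (i : Int) ∧ (i : Int) < min «end» n_actions)
            ↔ (max start 0 ≤ (i : Int) ∧ (i : Int) < min «end» (n_actions.toNat : Int)) := by
          omega
        rw [if_congr hiff rfl rfl]
      · rw [pv_bump_getD ((min (start + use_end) n_actions - max (start + use_start) 0).toNat)
          _ _ _ _ rfl (by omega) (by rw [h2]; omega)]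
        rw [← hNcast, pv_addRange_take_sum du (start + use_start) (start + use_end)
          n_actions.toNat h4 i hi, ← (h5 i hi).2]
        have hiff : (max (start + use_start) 0 ≤ (i : Int) ∧ (i : Int) < min (start + use_end) n_actions)
            ↔ (max (start + use_start) 0 ≤ (i : Int) ∧ (i : Int) < min (start + use_end) (n_actions.toNat : Int)) := by
          omega
        rw [if_congr hiff rfl rfl]

-- ===== VERDICT (by name: the statement is the Claim_ definition above) =====
theorem window_coverage_counts_py_spec : Claim_equal_window_coverage_counts_py := by
  intro n_actions windows _
  unfold Spec_window_coverage_counts_py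
  have hNcast : ((n_actions.toNat : Int)) = max n_actions 0 := by omega
  have hinv := pv_fold_inv n_actions windows
    (List.replicate n_actions.toNat 0) (List.replicate n_actions.toNat 0)
    (List.replicate (n_actions.toNat + 1) 0) (List.replicate (n_actions.toNat + 1) 0)
    (by simp) (by simp) (by simp) (by simp)
    (by intro i hi; constructor <;> simp [List.take_replicate])
  simp only at hinv
  obtain ⟨hl1, hl2, hpt⟩ := hinv
  unfold window_coverage_counts_py window_coverage_counts_py_alt
  simp only [← hNcast, Int.toNat_natCast]
  rw [pv_prefix_eq, pv_prefix_eq]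
  simp only [← hNcast] at hpt
  rw [Prod.ext_iff]
  constructor
  · apply List.ext_getElem
    · simp [hl1]
    · intro i h1 h2
      have hi : i < n_actions.toNat := by rw [hl1] at h1; exact h1
      rw [← List.getD_eq_getElem _ 0 h1, (hpt i hi).1]
      simp
  · apply List.ext_getElem
    · simp [hl2]
    · intro i h1 h2
      have hi : i < n_actions.toNat := by rw [hl2] at h1; exact h1
      rw [← List.getD_eq_getElem _ 0 h1, (hpt i hi).2]
      simp
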